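-- pv_equiv track=rewrite | github.com/markus-brln/BachelorThesisForestFireControl | CNN/data_translator_segments.py | waypoint2array
-- ===== SOURCE A (Python) =====
-- def waypoint2array(wp):
--   boxsize = 5
--   arr = {}
--   x = 0
--   cur_entry = 0
--   to_ret = -1
--   for y in range(-boxsize, boxsize + 1):
--     for entry in range(-x, x + 1):
--       arr[cur_entry] = (entry, y)
--       cur_entry += 1
--     x += 1 if y < 0 else -1
--   for idx in range(len(arr)):
--     if (arr[idx] == wp):
--       to_ret = idx
--   return to_ret
-- ===== SOURCE B (Python) =====
-- def waypoint2array(wp):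
--   e, y = wp
--   x = 5 - abs(y)
--   if abs(y) <= 5 and -x <= e <= x:
--     off = (y + 5) ** 2 if y <= 0 else 61 - (6 - y) ** 2
--     return off + e + x
--   return -1
-- ===== Notes on version B (the rewrite author's own statement) =====
-- stated objective: simpler
-- what changed: Replaces the build-a-dict-of-61-cells loop plus index scan by a closed-form arithmetic formula: the row offset is (y+5)^2 below the middle and 61-(6-y)^2 above, plus the column offset e+(5-|y|), with -1 when (e,y) is outside the diamond.
import Mathlib
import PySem

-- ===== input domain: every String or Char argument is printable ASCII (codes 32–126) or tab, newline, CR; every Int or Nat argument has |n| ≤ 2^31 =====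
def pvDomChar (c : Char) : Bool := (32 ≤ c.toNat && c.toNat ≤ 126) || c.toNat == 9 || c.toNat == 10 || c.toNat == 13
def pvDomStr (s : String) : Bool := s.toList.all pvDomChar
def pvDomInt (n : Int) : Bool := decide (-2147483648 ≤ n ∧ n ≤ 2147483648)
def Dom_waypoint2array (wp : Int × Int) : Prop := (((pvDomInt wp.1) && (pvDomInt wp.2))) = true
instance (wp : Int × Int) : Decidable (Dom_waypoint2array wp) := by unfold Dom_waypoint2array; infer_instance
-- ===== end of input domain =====

-- B replaces the dict-build-then-scan of a fixed 61-cell diamond by a closed-form index formula (objective: simpler).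

-- ===== PORT A =====
-- literal transliteration: first loop builds arr (a dict), x, cur_entry; second loop scans indices 0..len(arr)-1.
-- arr[idx] is ported as getD: in this program every key 0..len(arr)-1 is present, so the lookup never raises (exact here).
def waypoint2array (wp : Int × Int) : Int :=
  let boxsize : Int := 5
  let st :=
    (PySem.List.pyRange (-boxsize) (boxsize + 1) 1).foldl
      (fun (st : PySem.Dict Int (Int × Int) × Int × Int) y =>
        let st2 :=
          (PySem.List.pyRange (-st.2.1) (st.2.1 + 1) 1).foldl
            (fun (p : PySem.Dict Int (Int × Int) × Int) entry =>
              (p.1.insert p.2 (entry, y), p.2 + 1))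
            (st.1, st.2.2)
        (st2.1, st.2.1 + (if y < 0 then (1 : Int) else -1), st2.2))
      (PySem.Dict.empty, 0, 0)
  let arr := st.1
  (PySem.List.pyRange 0 (arr.size : Int) 1).foldl
    (fun toRet idx => if arr.getD idx (0, 0) = wp then idx else toRet) (-1)

-- ===== PORT B =====
def waypoint2array_alt (wp : Int × Int) : Int :=
  let e := wp.1
  let y := wp.2
  let x := 5 - |y|
  if |y| ≤ 5 ∧ -x ≤ e ∧ e ≤ x then
    (if y ≤ 0 then (y + 5) ^ 2 else 61 - (6 - y) ^ 2) + e + x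
  else
    -1

-- ===== PRECONDITION & SPEC =====
def Spec_waypoint2array (wp : Int × Int) (out : Int) : Prop := out = waypoint2array_alt wp
instance (wp : Int × Int) (out : Int) : Decidable (Spec_waypoint2array wp out) := by unfold Spec_waypoint2array; infer_instance

-- ===== CLAIM (what is proved, stated in full; the proofs are below) =====
def Claim_equal_waypoint2array : Prop := ∀ (wp : Int × Int), Dom_waypoint2array wp → Spec_waypoint2array wp (waypoint2array wp)


-- ===== LEMMAS AND PROOFS =====
set_option maxRecDepth 20000

def pvCells : List (Int × Int) := [(0, -5), (-1, -4), (0, -4), (1, -4), (-2, -3), (-1, -3), (0, -3), (1, -3), (2, -3), (-3, -2), (-2, -2), (-1, -2), (0, -2), (1, -2), (2, -2), (3, -2), (-4, -1), (-3, -1), (-2, -1), (-1, -1), (0, -1), (1, -1), (2, -1), (3, -1), (4, -1), (-5, 0), (-4, 0), (-3, 0), (-2, 0), (-1, 0), (0, 0), (1, 0), (2, 0), (3, 0), (4, 0), (5, 0), (-4, 1), (-3, 1), (-2, 1), (-1, 1), (0, 1), (1, 1), (2, 1), (3, 1), (4, 1), (-3, 2), (-2, 2), (-1, 2), (0, 2),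 (1, 2), (2, 2), (3, 2), (-2, 3), (-1, 3), (0, 3), (1, 3), (2, 3), (-1, 4), (0, 4), (1, 4), (0, 5)]
def pvDictA : PySem.Dict Int (Int × Int) := PySem.Dict.mk [(0, (0, -5)), (1, (-1, -4)), (2, (0, -4)), (3, (1, -4)), (4, (-2, -3)), (5, (-1, -3)), (6, (0, -3)), (7, (1, -3)), (8, (2, -3)), (9, (-3, -2)), (10, (-2, -2)), (11, (-1, -2)), (12, (0, -2)), (13, (1, -2)), (14, (2, -2)), (15, (3, -2)), (16, (-4, -1)), (17, (-3, -1)), (18, (-2, -1)), (19, (-1, -1)), (20, (0, -1)), (21, (1, -1)), (22, (2, -1)), (23, (3, -1)), (24, (4, -1)), (25, (-5, 0)), (26, (-4, 0)), (27, (-3, 0)), (28, (-2, 0)), (29, (-1, 0)), (30, (0, 0)), (31, (1, 0)), (32, (2, 0)), (33, (3, 0)), (34, (4, 0)), (35, (5, 0)), (36, (-4, 1)), (37, (-3, 1)), (38, (-2, 1)), (39, (-1, 1)), (40, (0, 1)), (41, (1, 1)), (42, (2, 1)), (43, (3, 1)), (44, (4, 1)), (45, (-3, 2)), (46, (-2,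 2)), (47, (-1, 2)), (48, (0, 2)), (49, (1, 2)), (50, (2, 2)), (51, (3, 2)), (52, (-2, 3)), (53, (-1, 3)), (54, (0, 3)), (55, (1, 3)), (56, (2, 3)), (57, (-1, 4)), (58, (0, 4)), (59, (1, 4)), (60, (0, 5))]


-- generic: if no index matches, the scan fold returns its accumulator
theorem pvScan_no_match (l : List Int) (wp : Int × Int) (a : Int)
    (h : ∀ i ∈ l, pvDictA.getD i (0, 0) ≠ wp) :
    l.foldl (fun toRet idx => if pvDictA.getD idx (0, 0) = wp then idx else toRet) a = a := by
  induction l generalizing a with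
  | nil => rfl
  | cons x xs ih =>
    simp only [List.foldl_cons]
    rw [if_neg (h x (List.mem_cons_self))]
    exact ih a (fun i hi => h i (List.mem_cons_of_mem _ hi))

-- every lookup in pvDictA (including the default) lands in pvCells
theorem pvGetD_mem (i : Int) : pvDictA.getD i (0, 0) ∈ pvCells := by
  rw [PySem.Dict.getD_eq_get?_getD]
  cases h : pvDictA.get? i with
  | none => decide
  | some v =>
    have hv : (i, v) ∈ pvDictA.items := PySem.Dict.mem_items_of_get?_eq_some _ h
    have : v ∈ pvDictA.items.map (·.2) := List.mem_map_of_mem hv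
    rw [show pvDictA.items.map (·.2) = pvCells from by decide] at this
    simpa using this

-- bridge: the scan over a state equal to the evaluated first-loop state
theorem pvScan_congr (st : PySem.Dict Int (Int × Int) × Int × Int)
    (h : st = (pvDictA, -1, 61)) (wp : Int × Int) :
    (PySem.List.pyRange 0 (st.1.size : Int) 1).foldl
        (fun toRet idx => if st.1.getD idx (0, 0) = wp then idx else toRet) (-1)
      = (PySem.List.pyRange 0 61 1).foldl
        (fun toRet idx => if pvDictA.getD idx (0, 0) = wp then idx else toRet) (-1) := by
  subst h
  rw [show ((pvDictA.size : Int)) = 61 from by decide]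

theorem pvA_unfold (wp : Int × Int) :
    waypoint2array wp
      = (PySem.List.pyRange 0 61 1).foldl
          (fun toRet idx => if pvDictA.getD idx (0, 0) = wp then idx else toRet) (-1) := by
  unfold waypoint2array
  exact pvScan_congr _ (by decide) wp

theorem pvMem_of_bounds (e y : Int) (h1 : |y| <= 5) (h2 : -(5 - |y|) <= e) (h3 : e <= 5 - |y|) :
    (e, y) ∈ pvCells := by
  obtain ⟨hy1, hy2⟩ := abs_le.mp h1
  interval_cases y <;>
    norm_num at h2 h3 <;>
    interval_cases e <;> decide

-- ===== VERDICT (by name: the statement is the Claim_ definition above) =====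
theorem waypoint2array_spec : Claim_equal_waypoint2array := by
  intro wp _
  show waypoint2array wp = waypoint2array_alt wp
  by_cases hmem : wp ∈ pvCells
  · fin_cases hmem <;> decide
  · rw [pvA_unfold]
    rw [pvScan_no_match _ wp _ (fun i _ hi => hmem (hi ▸ pvGetD_mem i))]
    unfold waypoint2array_alt
    rw [if_neg]
    rintro ⟨h1, h2, h3⟩
    obtain ⟨e, y⟩ := wp
    exact hmem (pvMem_of_bounds e y h1 h2 h3)
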